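-- pv_equiv track=rewrite | github.com/unknownboyy/GUVI | pro24.py | deleteProducts
-- ===== SOURCE A (Python) =====
-- def deleteProducts(ids, m):
--     d = dict()
--     for i in ids:
--         if i in d:
--             d[i]+=1
--         else:
--             d[i]=1
--     w = list(d.values())
--     w.sort()
--     count = len(w)
--     for i in range(len(w)):
--         if m>w[i]:
--             m-=w[i]
--             count-=1
--         elif m==w[i]:
--             m=0;count-=1;break
--         else:
--             break
--     return count
-- ===== SOURCE B (Python) =====
-- def deleteProducts(ids, m):
--     freq = {}
--     for i in ids:
--         freq[i] = freq.get(i, 0) + 1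
--     buckets = {}
--     maxf = 0
--     for f in freq.values():
--         buckets[f] = buckets.get(f, 0) + 1
--         if f > maxf:
--             maxf = f
--     remaining = len(freq)
--     budget = m
--     for f in range(1, maxf + 1):
--         c = buckets.get(f, 0)
--         if c == 0:
--             continue
--         take = budget // f
--         if take <= 0:
--             break
--         if take >= c:
--             remaining -= c
--             budget -= c * f
--         else:
--             remaining -= take
--             break
--     return remaining
-- ===== Notes on version B (the rewrite author's own statement) =====
-- stated objective: alternative
-- what changed: Replaced A's sort-then-subtract-and-break walk over individual frequency groups with a counting-bucket scheme: a histogram of frequency values plus a running max, then a sweep over sizes 1..maxf that removes whole buckets with one floor division per size, so no sort and no per-group loop.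
import Mathlib
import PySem

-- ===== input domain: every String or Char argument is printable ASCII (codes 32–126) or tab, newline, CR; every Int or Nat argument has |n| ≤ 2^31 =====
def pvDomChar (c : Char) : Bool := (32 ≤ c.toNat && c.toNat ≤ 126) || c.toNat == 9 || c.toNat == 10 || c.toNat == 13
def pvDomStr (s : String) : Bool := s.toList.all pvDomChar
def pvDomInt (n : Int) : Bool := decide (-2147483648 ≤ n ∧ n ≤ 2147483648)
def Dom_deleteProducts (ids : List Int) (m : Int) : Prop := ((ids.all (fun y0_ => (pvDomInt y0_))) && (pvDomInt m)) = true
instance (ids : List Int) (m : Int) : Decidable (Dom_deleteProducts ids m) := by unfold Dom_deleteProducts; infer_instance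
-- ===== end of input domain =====

-- B replaces A's sort + per-group subtract-and-break loop by a counting-bucket sweep
-- (histogram of frequency values, one floor division per size); equal on all inputs.

-- ===== PORT A =====
-- the 'for i in range(len(w))' loop with its break, on state (m, count); break returns count
def deleteProductsLoop : List Int → Int → Int → Int
  | [], _, count => count
  | x :: xs, m, count =>
    if m > x then deleteProductsLoop xs (m - x) (count - 1)
    else if m = x then count - 1
    else count

def deleteProducts (ids : List Int) (m : Int) : Int :=
  let d : PySem.Dict Int Int :=
    ids.foldl (fun d i => if d.contains i then d.modify i 0 (· + 1) else d.insert i 1)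
      PySem.Dict.empty
  let w := PySem.List.sorted d.values (fun x => x) false
  deleteProductsLoop w m (w.length : Int)

-- ===== PORT B =====
-- the 'for f in range(1, maxf+1)' loop with its breaks, on state (remaining, budget)
def bucketLoop : List Int → PySem.Dict Int Int → Int → Int → Int
  | [], _, remaining, _ => remaining
  | f :: fs, buckets, remaining, budget =>
    let c := buckets.getD f 0
    if c = 0 then bucketLoop fs buckets remaining budget
    else
      let take := PySem.Int.floordiv budget f
      if take ≤ 0 then remaining
      else if take ≥ c then bucketLoop fs buckets (remaining - c) (budget - c * f)
      else remaining - take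

def deleteProducts_alt (ids : List Int) (m : Int) : Int :=
  let freq : PySem.Dict Int Int :=
    ids.foldl (fun d i => d.insert i (d.getD i 0 + 1)) PySem.Dict.empty
  -- the 'for f in freq.values()' loop, on state (buckets, maxf)
  let bm :=
    freq.values.foldl
      (fun (p : PySem.Dict Int Int × Int) f =>
        (p.1.insert f (p.1.getD f 0 + 1), if f > p.2 then f else p.2))
      (PySem.Dict.empty, 0)
  bucketLoop (PySem.List.pyRange 1 (bm.2 + 1) 1) bm.1 (freq.size : Int) m

-- ===== PRECONDITION & SPEC =====
def Spec_deleteProducts (ids : List Int) (m : Int) (out : Int) : Prop := out = deleteProducts_alt ids m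
instance (ids : List Int) (m : Int) (out : Int) : Decidable (Spec_deleteProducts ids m out) := by unfold Spec_deleteProducts; infer_instance

-- ===== CLAIM (what is proved, stated in full; the proofs are below) =====
def Claim_equal_deleteProducts : Prop := ∀ (ids : List Int) (m : Int), Dom_deleteProducts ids m → Spec_deleteProducts ids m (deleteProducts ids m)

-- ===== LEMMAS AND PROOFS =====

-- number of prefix sums of l that are ≤ m (the yardstick both loops are measured against)
def removedCnt : List Int → Int → Int
  | [], _ => 0
  | x :: xs, m => (if x ≤ m then 1 else 0) + removedCnt xs (m - x)

-- A's step function is exactly the Counter step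
theorem stepA_eq_modify (d : PySem.Dict Int Int) (x : Int) :
    (if d.contains x then d.modify x 0 (· + 1) else d.insert x 1) = d.modify x 0 (· + 1) := by
  split_ifs with h
  · rfl
  · rw [PySem.Dict.modify, PySem.Dict.getD_of_not_contains]
    · norm_num
    · simpa using h

theorem dictA_eq_counter (ids : List Int) :
    ids.foldl (fun d i => if d.contains i then d.modify i 0 (· + 1) else d.insert i 1)
      PySem.Dict.empty = PySem.Dict.counter ids := by
  rw [PySem.Dict.counter_eq_foldl]
  apply PySem.List.foldl_congr_mem
  intro d x _
  exact stepA_eq_modify d x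

-- every value of Counter(ids) is at least 1
theorem counter_values_pos (ids : List Int) :
    ∀ v ∈ (PySem.Dict.counter ids).values, 1 ≤ v := by
  intro v hv
  have : (PySem.Dict.counter ids).values
      = ((PySem.Set.ofList ids).map (fun k => (k, (ids.count k : Int)))).map (·.2) := by
    simp only [PySem.Dict.values, PySem.Dict.items_counter]
  rw [this] at hv
  simp only [List.map_map, List.mem_map] at hv
  obtain ⟨k, hk, rfl⟩ := hv
  have hk' : k ∈ ids := (PySem.Set.mem_ofList ids k).mp hk
  have : 1 ≤ ids.count k := List.count_pos_iff.mpr hk'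
  simp only [Function.comp]
  exact_mod_cast this

theorem removedCnt_nonpos (ws : List Int) (m : Int)
    (hpos : ∀ v ∈ ws, 1 ≤ v) (hm : m ≤ 0) : removedCnt ws m = 0 := by
  induction ws generalizing m with
  | nil => rfl
  | cons x xs ih =>
    have hx : 1 ≤ x := hpos x (by simp)
    simp only [removedCnt]
    rw [if_neg (by omega),
      ih (m - x) (fun v hv => hpos v (List.mem_cons_of_mem _ hv)) (by omega)]
    norm_num

-- A's break loop equals count minus the prefix-sum count, for positive entries
theorem loopA_eq (ws : List Int) (m c : Int) (hpos : ∀ v ∈ ws, 1 ≤ v) :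
    deleteProductsLoop ws m c = c - removedCnt ws m := by
  induction ws generalizing m c with
  | nil => simp [deleteProductsLoop, removedCnt]
  | cons x xs ih =>
    have hx : 1 ≤ x := hpos x (by simp)
    have hpos' : ∀ v ∈ xs, 1 ≤ v := fun v hv => hpos v (List.mem_cons_of_mem _ hv)
    simp only [deleteProductsLoop, removedCnt]
    by_cases h1 : m > x
    · rw [if_pos h1, ih (m - x) (c - 1) hpos', if_pos (by omega)]; ring
    · rw [if_neg h1]
      by_cases h2 : m = x
      · rw [if_pos h2, if_pos (by omega),
          removedCnt_nonpos xs (m - x) hpos' (by omega)]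
        ring
      · rw [if_neg h2, if_neg (by omega),
          removedCnt_nonpos xs (m - x) hpos' (by omega)]
        ring

-- removedCnt over an append threads the budget by the left sum
theorem removedCnt_append (l1 l2 : List Int) (b : Int) :
    removedCnt (l1 ++ l2) b = removedCnt l1 b + removedCnt l2 (b - l1.sum) := by
  induction l1 generalizing b with
  | nil => simp [removedCnt]
  | cons x xs ih =>
    simp only [List.cons_append, removedCnt, ih, List.sum_cons]
    have : b - x - xs.sum = b - (x + xs.sum) := by ring
    rw [this]; ring

-- removedCnt of c copies of a positive f: clamped floor division
theorem removedCnt_replicate (c : Nat) (f b : Int) (hf : 1 ≤ f) :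
    removedCnt (List.replicate c f) b = max 0 (min (c : Int) (PySem.Int.floordiv b f)) := by
  induction c generalizing b with
  | zero => simp [removedCnt]
  | succ n ih =>
    simp only [List.replicate_succ, removedCnt, ih]
    have hdiv : PySem.Int.floordiv (b - f) f = PySem.Int.floordiv b f - 1 := by
      rw [PySem.Int.floordiv_eq_ediv_of_pos (by omega),
        PySem.Int.floordiv_eq_ediv_of_pos (by omega)]
      have : b - f = b + (-1) * f := by ring
      rw [this, Int.add_mul_ediv_right _ _ (by omega : f ≠ 0)]
      ring
    rw [hdiv]
    have hq := PySem.Int.floordiv_eq_iff_of_pos (a := b) (b := f)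
      (q := PySem.Int.floordiv b f) (by omega)
    have hqspec := hq.mp rfl
    by_cases hfb : f ≤ b
    · have h1 : 1 ≤ PySem.Int.floordiv b f := by
        rcases hqspec with ⟨h1, h2⟩; nlinarith
      rw [if_pos hfb]
      push_cast
      omega
    · have h0 : PySem.Int.floordiv b f ≤ 0 := by
        rcases hqspec with ⟨h1, h2⟩; nlinarith
      rw [if_neg hfb]
      push_cast
      omega

-- removedCnt is 0 when the budget is below every (positive) entry
theorem removedCnt_all_gt (l : List Int) (b : Int)
    (h : ∀ v ∈ l, 1 ≤ v ∧ b < v) : removedCnt l b = 0 := by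
  cases l with
  | nil => rfl
  | cons x xs =>
    obtain ⟨hx1, hxb⟩ := h x (by simp)
    simp only [removedCnt]
    rw [if_neg (by omega),
      removedCnt_nonpos xs (b - x) (fun v hv => (h v (List.mem_cons_of_mem _ hv)).1) (by omega)]
    norm_num

-- B's bucket loop computes remaining minus the prefix-sum count of the expanded bucket list
theorem bucketLoop_eq (fs : List Int) (buckets : PySem.Dict Int Int) (r b : Int)
    (hpos : ∀ g ∈ fs, 1 ≤ g)
    (hmono : fs.Pairwise (· ≤ ·))
    (hnn : ∀ g, 0 ≤ buckets.getD g 0) :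
    bucketLoop fs buckets r b
      = r - removedCnt (fs.flatMap (fun g => List.replicate (buckets.getD g 0).toNat g)) b := by
  induction fs generalizing r b with
  | nil => simp [bucketLoop, removedCnt]
  | cons f fs ih =>
    have hf : 1 ≤ f := hpos f (by simp)
    have hpos' : ∀ g ∈ fs, 1 ≤ g := fun g hg => hpos g (List.mem_cons_of_mem _ hg)
    have hmono' : fs.Pairwise (· ≤ ·) := hmono.of_cons
    have hle : ∀ g ∈ fs, f ≤ g := fun g hg => (List.pairwise_cons.mp hmono).1 g hg
    set c := buckets.getD f 0 with hc
    have hc0 : 0 ≤ c := hnn f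
    simp only [bucketLoop, List.flatMap_cons, removedCnt_append]
    by_cases hcz : c = 0
    · rw [if_pos hcz, ih r b hpos' hmono']
      simp [← hc, hcz, removedCnt]
    · rw [if_neg hcz]
      have hc1 : 1 ≤ c := by omega
      set take := PySem.Int.floordiv b f with htake
      have hqspec := (PySem.Int.floordiv_eq_iff_of_pos (a := b) (b := f)
        (q := take) (by omega)).mp rfl
      have hrepl := removedCnt_replicate c.toNat f b hf
      have hctn : ((c.toNat : Int)) = c := Int.toNat_of_nonneg hc0
      rw [hctn] at hrepl
      have hsum : (List.replicate c.toNat f).sum = c * f := by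
        rw [List.sum_replicate, nsmul_eq_mul, hctn]
      by_cases ht0 : take ≤ 0
      · rw [if_pos ht0]
        have hbf : b < f := by rcases hqspec with ⟨h1, h2⟩; nlinarith
        have hall : removedCnt (List.replicate c.toNat f
            ++ fs.flatMap (fun g => List.replicate (buckets.getD g 0).toNat g)) b = 0 := by
          apply removedCnt_all_gt
          intro v hv
          rcases List.mem_append.mp hv with hv | hv
          · rw [List.eq_of_mem_replicate hv]; exact ⟨hf, hbf⟩
          · rcases List.mem_flatMap.mp hv with ⟨g, hg, hvg⟩
            rw [List.eq_of_mem_replicate hvg]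
            exact ⟨hpos' g hg, by have := hle g hg; omega⟩
        rw [← removedCnt_append, hall]; ring
      · rw [if_neg ht0]
        have ht1 : 1 ≤ take := by omega
        by_cases htc : take ≥ c
        · rw [if_pos htc, ih (r - c) (b - c * f) hpos' hmono', hrepl, hsum]
          have : min c take = c := by omega
          rw [this]
          have : max 0 c = c := by omega
          rw [this]
          ring
        · rw [if_neg htc]
          have hrest : removedCnt
              (fs.flatMap (fun g => List.replicate (buckets.getD g 0).toNat g))
              (b - (List.replicate c.toNat f).sum) = 0 := by
            apply removedCnt_nonpos
            · intro v hv
              rcases List.mem_flatMap.mp hv with ⟨g, hg, hvg⟩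
              rw [List.eq_of_mem_replicate hvg]; exact hpos' g hg
            · rw [hsum]
              have hblt : b < c * f := by rcases hqspec with ⟨h1, h2⟩; nlinarith
              omega
          rw [hrest, hrepl]
          have : min c take = take := by omega
          rw [this]
          have : max 0 take = take := by omega
          rw [this]
          ring

-- the count of v in the bucket expansion of a nodup list of sizes
theorem count_flatMap_replicate (fs : List Int) (cnt : Int → Nat) (v : Int)
    (hnd : fs.Nodup) :
    (fs.flatMap (fun g => List.replicate (cnt g) g)).count v
      = if v ∈ fs then cnt v else 0 := by
  induction fs with
  | nil => simp
  | cons f fs ih =>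
    have hnd' := hnd.of_cons
    have hfnot : f ∉ fs := (List.nodup_cons.mp hnd).1
    simp only [List.flatMap_cons, List.count_append, List.count_replicate, ih hnd',
      List.mem_cons]
    by_cases hvf : v = f
    · subst hvf
      simp [hfnot]
    · simp [hvf, Ne.symm hvf]

-- the bucket expansion over 1..maxf is a sorted rearrangement of ws
theorem sorted_eq_flatMap (ws : List Int) (maxf : Int)
    (hpos : ∀ v ∈ ws, 1 ≤ v) (hmax : ∀ v ∈ ws, v ≤ maxf) :
    PySem.List.sorted ws (fun x => x) false
      = (PySem.List.pyRange 1 (maxf + 1) 1).flatMap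
          (fun g => List.replicate (ws.count g) g) := by
  apply PySem.List.sorted_id_eq_of_perm_of_pairwise
  · rw [List.perm_iff_count]
    intro v
    rw [count_flatMap_replicate _ _ _ (PySem.List.nodup_pyRange_one _ _)]
    by_cases hv : v ∈ PySem.List.pyRange 1 (maxf + 1) 1
    · simp [hv]
    · rw [if_neg hv, PySem.List.mem_pyRange_one] at *
      rw [eq_comm, List.count_eq_zero_of_not_mem]
      intro hvws
      exact hv ⟨hpos v hvws, by have := hmax v hvws; omega⟩
  · apply List.pairwise_flatMap.mpr
    refine ⟨fun g _ => List.pairwise_replicate.mpr (Or.inr (le_refl g)), ?_⟩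
    apply (PySem.List.pairwise_lt_pyRange_one 1 (maxf + 1)).imp_of_mem
    intro a b _ _ hab x hx y hy
    rw [List.eq_of_mem_replicate hx, List.eq_of_mem_replicate hy]
    omega

-- ===== VERDICT (by name: the statement is the Claim_ definition above) =====
theorem deleteProducts_spec : Claim_equal_deleteProducts := by
  intro ids m _
  show deleteProducts ids m = deleteProducts_alt ids m
  simp only [deleteProducts, deleteProducts_alt, dictA_eq_counter,
    PySem.Dict.foldl_insert_getD_add_one_eq_counter,
    PySem.List.foldl_prod_mk (f := fun (d : PySem.Dict Int Int) f => d.insert f (d.getD f 0 + 1))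
      (g := fun mx f => if f > mx then f else mx),
    PySem.Dict.foldl_insert_getD_add_one_eq_counter]
  set ws := (PySem.Dict.counter ids).values with hws
  have hpos : ∀ v ∈ ws, 1 ≤ v := counter_values_pos ids
  have hmaxfold : ws.foldl (fun mx f => if f > mx then f else mx) 0 = ws.foldl max 0 := by
    apply PySem.List.foldl_congr_mem
    intro mx f _
    by_cases h : f > mx
    · rw [if_pos h, max_eq_right (by omega)]
    · rw [if_neg h, max_eq_left (by omega)]
  rw [hmaxfold]
  set maxf := ws.foldl max 0 with hmaxf
  have hmax : ∀ v ∈ ws, v ≤ maxf := (PySem.List.le_foldl_max ws 0).2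
  have hposr : ∀ v ∈ PySem.List.sorted ws (fun x => x) false, 1 ≤ v := fun v hv =>
    hpos v ((PySem.List.mem_sorted _ _ _ _).mp hv)
  rw [loopA_eq _ m _ hposr,
    bucketLoop_eq _ _ _ _
      (fun g hg => ((PySem.List.mem_pyRange_one).mp hg).1)
      ((PySem.List.pairwise_lt_pyRange_one 1 (maxf + 1)).imp fun h => le_of_lt h)
      (fun g => by rw [PySem.Dict.getD_counter]; positivity)]
  have hbuck : (fun g => List.replicate (((PySem.Dict.counter ws).getD g 0).toNat) g)
      = fun g => List.replicate (ws.count g) g := by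
    funext g
    rw [PySem.Dict.getD_counter, Int.toNat_natCast]
  rw [hbuck, ← sorted_eq_flatMap ws maxf hpos hmax,
    PySem.List.length_sorted]
  have hsz : ((PySem.Dict.counter ids).size : Int) = (ws.length : Int) := by
    simp [PySem.Dict.size, hws, PySem.Dict.values]
  rw [hsz]
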